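-- pv_equiv track=rewrite | github.com/GundalaNikhil/DSA | dsa-problems/Bitwise/test_all_hidden_testcases.py | bit_016_solution
-- ===== SOURCE A (Python) =====
-- def bit_016_solution(n, K, arr):
--     """BIT-016: Max OR Subarray LEQ K"""
--     if not arr or n == 0:
--         return 0
--
--     max_len = 0
--     bit_count = [0] * 30
--     L = 0
--
--     def compute_or():
--         result = 0
--         for i in range(30):
--             if bit_count[i] > 0:
--                 result |= (1 << i)
--         return result
--
--     for R in range(len(arr)):
--         for i in range(30):
--             if arr[R] & (1 << i):
--                 bit_count[i] += 1
--
--         while L <= R and compute_or() > K: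
--             for i in range(30):
--                 if arr[L] & (1 << i):
--                     bit_count[i] -= 1
--             L += 1
--
--         max_len = max(max_len, R - L + 1)
--
--     return max_len
-- ===== SOURCE B (Python) =====
-- def bit_016_solution(n, K, arr):
--     """BIT-016: Max OR Subarray LEQ K -- per-endpoint backward scan.
--
--     For each right endpoint R, scan leftwards accumulating the OR of the
--     30-bit-masked elements, stopping at the first index whose inclusion
--     pushes the OR above K; the window scanned so far is the longest one
--     ending at R, because the OR only grows as the window extends left.
--     """
--     if not arr or n == 0:
--         return 0
--     MASK = (1 << 30) - 1
--     best = 0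
--     for R in range(len(arr)):
--         o = 0
--         j = R
--         while j >= 0:
--             o |= arr[j] & MASK
--             if o > K:
--                 break
--             j -= 1
--         best = max(best, R - j)
--     return best
-- ===== Notes on version B (the rewrite author's own statement) =====
-- stated objective: alternative
-- what changed: Replaces A's sliding window with shared per-bit counters and an incrementally maintained left pointer by an independent backward scan from each right endpoint that recomputes the masked window-OR directly and stops at the first index that pushes it above K.
import Mathlib
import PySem

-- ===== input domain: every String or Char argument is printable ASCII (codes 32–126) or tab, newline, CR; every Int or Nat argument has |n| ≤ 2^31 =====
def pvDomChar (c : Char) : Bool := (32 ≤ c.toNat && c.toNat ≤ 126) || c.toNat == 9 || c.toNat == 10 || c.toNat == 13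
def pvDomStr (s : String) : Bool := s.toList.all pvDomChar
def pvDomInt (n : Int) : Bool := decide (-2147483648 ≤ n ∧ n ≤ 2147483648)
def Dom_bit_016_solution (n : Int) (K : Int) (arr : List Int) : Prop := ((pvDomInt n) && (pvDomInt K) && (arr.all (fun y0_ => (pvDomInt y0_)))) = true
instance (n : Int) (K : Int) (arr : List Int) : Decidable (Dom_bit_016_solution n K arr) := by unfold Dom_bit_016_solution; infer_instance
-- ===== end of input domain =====

-- B replaces A's sliding window with per-bit counters by an independent backward scan from each
-- right endpoint that stops at the first OR overflow (alternative decomposition; quadratic in the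
-- worst case, so not claimed faster).

-- ===== PORT A =====
-- literal port of A's inner `for i in range(30): if arr[R] & (1 << i): bit_count[i] += 1`
def pvAddBits (a : Int) (bc : List Int) : List Int :=
  (List.range 30).foldl
    (fun b i => if Int.land a (Int.shiftLeft 1 i) ≠ 0 then b.set i (b.getD i 0 + 1) else b) bc

-- literal port of the decrement loop in the `while`
def pvDelBits (a : Int) (bc : List Int) : List Int :=
  (List.range 30).foldl
    (fun b i => if Int.land a (Int.shiftLeft 1 i) ≠ 0 then b.set i (b.getD i 0 - 1) else b) bc

-- literal port of `compute_or`
def pvComputeOr (bc : List Int) : Int :=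
  (List.range 30).foldl
    (fun r i => if bc.getD i 0 > 0 then Int.lor r (Int.shiftLeft 1 i) else r) 0

-- the `while L <= R and compute_or() > K` loop; the fuel only makes it total
-- (each iteration increments L, and the guard needs L ≤ R, so R+1 steps suffice)
def pvShrink (K : Int) (arr : List Int) (R : Nat) : Nat → List Int × Nat → List Int × Nat
  | 0, st => st
  | fuel+1, (bc, L) =>
    if L ≤ R ∧ pvComputeOr bc > K then
      pvShrink K arr R fuel (pvDelBits (arr.getD L 0) bc, L + 1)
    else (bc, L)

-- body of `for R in range(len(arr))`; state = (max_len, bit_count, L)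
def pvStepA (K : Int) (arr : List Int) (st : Int × List Int × Nat) (R : Nat) : Int × List Int × Nat :=
  let bc1 := pvAddBits (arr.getD R 0) st.2.1
  let s2 := pvShrink K arr R (R + 1) (bc1, st.2.2)
  (max st.1 ((R : Int) - (s2.2 : Int) + 1), s2)

def bit_016_solution (n : Int) (K : Int) (arr : List Int) : Int :=
  if arr = [] ∨ n = 0 then 0
  else ((List.range arr.length).foldl (pvStepA K arr) (0, List.replicate 30 0, 0)).1

-- ===== PORT B =====
-- `while j >= 0: o |= arr[j] & MASK; if o > K: break; j -= 1`; k = j + 1, returns the final j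
def pvScan (K : Int) (arr : List Int) : Int → Nat → Int
  | _, 0 => -1
  | o, k+1 =>
    let o2 := Int.lor o (Int.land (arr.getD k 0) (Int.shiftLeft 1 30 - 1))
    if o2 > K then (k : Int) else pvScan K arr o2 k

def bit_016_solution_alt (n : Int) (K : Int) (arr : List Int) : Int :=
  if arr = [] ∨ n = 0 then 0
  else (List.range arr.length).foldl (fun (best : Int) (R : Nat) => max best ((R : Int) - pvScan K arr 0 (R + 1))) 0

-- ===== PRECONDITION & SPEC =====
def Spec_bit_016_solution (n : Int) (K : Int) (arr : List Int) (out : Int) : Prop := out = bit_016_solution_alt n K arr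
instance (n : Int) (K : Int) (arr : List Int) (out : Int) : Decidable (Spec_bit_016_solution n K arr out) := by unfold Spec_bit_016_solution; infer_instance

-- ===== CLAIM (what is proved, stated in full; the proofs are below) =====
def Claim_equal_bit_016_solution : Prop := ∀ (n : Int) (K : Int) (arr : List Int), Dom_bit_016_solution n K arr → Spec_bit_016_solution n K arr (bit_016_solution n K arr)

-- ===== LEMMAS AND PROOFS =====

-- ---- generic Nat/Int bit facts ----
theorem nat_le_lor_left (a b : ℕ) : a ≤ a ||| b := by
  have h : a &&& (a ||| b) = a := by
    apply Nat.eq_of_testBit_eq; intro i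
    rw [Nat.testBit_and, Nat.testBit_or]
    cases h : a.testBit i <;> simp
  calc a = a &&& (a ||| b) := h.symm
    _ ≤ a ||| b := Nat.and_le_right

theorem lorCast (a b : ℕ) : Int.lor (a : ℤ) (b : ℤ) = ((a ||| b : ℕ) : ℤ) := by simp [Int.lor]

theorem shiftCast (i : ℕ) : Int.shiftLeft 1 i = ((2 ^ i : ℕ) : ℤ) := by
  show Int.shiftLeft (Int.ofNat 1) i = _
  simp [Int.shiftLeft, Nat.shiftLeft_eq]

theorem int_toNat_testBit (x : ℤ) (h : 0 ≤ x) (j : ℕ) : x.toNat.testBit j = x.testBit j := by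
  cases x with
  | ofNat m => rfl
  | negSucc m => exact absurd h (by exact of_decide_eq_false rfl)

theorem land_natCast_nonneg (a : ℤ) (m : ℕ) : 0 ≤ Int.land a (m : ℤ) := by
  cases a with
  | ofNat x => simp [Int.land]
  | negSucc x => simp [Int.land]

theorem natCast_testBit (m : ℕ) (j : ℕ) : ((m : ℤ)).testBit j = m.testBit j := rfl

-- `arr[?] & (1 << i)` is nonzero iff bit i of the element is set
theorem land_pow_ne (a : ℤ) (i : ℕ) : (Int.land a (Int.shiftLeft 1 i) ≠ 0) ↔ a.testBit i = true := by
  have hnn : 0 ≤ Int.land a (Int.shiftLeft 1 i) := by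
    rw [shiftCast]; exact land_natCast_nonneg a _
  have htb : ∀ j, (Int.land a (Int.shiftLeft 1 i)).toNat.testBit j = (a.testBit j && decide (i = j)) := by
    intro j
    rw [int_toNat_testBit _ hnn, Int.testBit_land, shiftCast, natCast_testBit, Nat.testBit_two_pow]
  have hX : (Int.land a (Int.shiftLeft 1 i)).toNat = if a.testBit i = true then 2 ^ i else 0 := by
    apply Nat.eq_of_testBit_eq; intro j
    by_cases hij : i = j
    · subst hij; rw [htb i]; cases h : a.testBit i <;> simp
    · rw [htb j]
      split <;> simp [Nat.zero_testBit, hij]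
  constructor
  · intro hne
    by_contra hbit
    have h0 : a.testBit i = false := by revert hbit; cases a.testBit i <;> simp
    have : (Int.land a (Int.shiftLeft 1 i)).toNat = 0 := by rw [hX, h0]; simp
    exact hne (by omega)
  · intro hbit h0
    have : (Int.land a (Int.shiftLeft 1 i)).toNat = 2 ^ i := by rw [hX, hbit]; simp
    have hp : 0 < 2 ^ i := Nat.two_pow_pos i
    omega

-- masked element as a natural number
def mN (a : Int) : Nat := (Int.land a (Int.shiftLeft 1 30 - 1)).toNat

theorem mask_lit : Int.shiftLeft 1 30 - 1 = ((2 ^ 30 - 1 : ℕ) : ℤ) := by decide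

theorem mask_nonneg (a : ℤ) : 0 ≤ Int.land a (Int.shiftLeft 1 30 - 1) := by
  rw [mask_lit]; exact land_natCast_nonneg a _

theorem mask_cast (a : ℤ) : Int.land a (Int.shiftLeft 1 30 - 1) = ((mN a : ℕ) : ℤ) :=
  (Int.toNat_of_nonneg (mask_nonneg a)).symm

theorem mN_testBit (a : ℤ) (j : ℕ) : (mN a).testBit j = (decide (j < 30) && a.testBit j) := by
  show (Int.land a (Int.shiftLeft 1 30 - 1)).toNat.testBit j = _
  rw [int_toNat_testBit _ (mask_nonneg a), Int.testBit_land, mask_lit, natCast_testBit,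
    Nat.testBit_two_pow_sub_one, Bool.and_comm]

-- ---- the OR of the masked window arr[k..R] ----
def orSuf (arr : List Int) (R : Nat) (k : Nat) : Nat :=
  if k ≤ R then orSuf arr R (k+1) ||| mN (arr.getD k 0) else 0
termination_by R + 1 - k

theorem orSuf_step (arr : List Int) (R k : Nat) (h : k ≤ R) :
    orSuf arr R k = orSuf arr R (k+1) ||| mN (arr.getD k 0) := by
  rw [orSuf]; simp [h]

theorem orSuf_stop (arr : List Int) (R k : Nat) (h : ¬ k ≤ R) : orSuf arr R k = 0 := by
  rw [orSuf]; simp [h]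

theorem orSuf_anti (arr : List Int) (R : Nat) : ∀ j j' : Nat, j ≤ j' → orSuf arr R j' ≤ orSuf arr R j := by
  intro j j' h
  induction j' with
  | zero => simp_all
  | succ m ih =>
    rcases Nat.lt_or_ge j (m+1) with hlt | hge
    · have hm : j ≤ m := by omega
      refine le_trans ?_ (ih hm)
      by_cases hmr : m ≤ R
      · rw [orSuf_step arr R m hmr]; exact nat_le_lor_left _ _
      · rw [orSuf_stop arr R (m+1) (by omega)]; exact Nat.zero_le _
    · have : j = m + 1 := by omega
      subst this; exact le_refl _

theorem orSuf_testBit (arr : List Int) (R : Nat) (j : ℕ) : ∀ len k, R + 1 - k = len →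
    (orSuf arr R k).testBit j = (List.range' k len).any (fun t => (mN (arr.getD t 0)).testBit j) := by
  intro len
  induction len with
  | zero =>
    intro k hk
    rw [orSuf_stop arr R k (by omega)]
    simp [Nat.zero_testBit]
  | succ m ih =>
    intro k hk
    have hkR : k ≤ R := by omega
    rw [orSuf_step arr R k hkR, Nat.testBit_or, List.range'_succ, List.any_cons,
      ih (k+1) (by omega), Bool.or_comm]

theorem orSuf_succR (arr : List Int) (R : Nat) : ∀ len j, R + 2 - j = len → j ≤ R + 1 →
    orSuf arr (R+1) j = orSuf arr R j ||| mN (arr.getD (R+1) 0) := by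
  intro len
  induction len with
  | zero => intro j h1 h2; omega
  | succ m ih =>
    intro j h1 h2
    by_cases hj : j = R + 1
    · subst hj
      rw [orSuf_step arr (R+1) (R+1) (le_refl _), orSuf_stop arr (R+1) (R+2) (by omega),
        orSuf_stop arr R (R+1) (by omega)]
    · have hjR : j ≤ R := by omega
      rw [orSuf_step arr (R+1) j (by omega), ih (j+1) (by omega) (by omega),
        orSuf_step arr R j hjR, Nat.lor_assoc,
        Nat.lor_comm (mN (arr.getD (R+1) 0)) (mN (arr.getD j 0)), ← Nat.lor_assoc]

-- ---- the break index of B's backward scan ----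
def findBad (K : Int) (arr : List Int) (R : Nat) : Nat → Int
  | 0 => -1
  | k+1 => if ((orSuf arr R k : ℕ) : ℤ) > K then (k : ℤ) else findBad K arr R k

theorem findBad_ge (K : Int) (arr : List Int) (R : Nat) : ∀ n, -1 ≤ findBad K arr R n := by
  intro n
  induction n with
  | zero => simp [findBad]
  | succ m ih =>
    rw [findBad]
    split
    · omega
    · exact ih

theorem findBad_lt (K : Int) (arr : List Int) (R : Nat) : ∀ n, findBad K arr R n < (n : ℤ) := by
  intro n
  induction n with
  | zero => simp [findBad]
  | succ m ih =>
    rw [findBad]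
    split
    · push_cast; omega
    · push_cast; omega

theorem findBad_good (K : Int) (arr : List Int) (R : Nat) :
    ∀ n j, j < n → findBad K arr R n < (j : ℤ) → ¬ ((orSuf arr R j : ℕ) : ℤ) > K := by
  intro n
  induction n with
  | zero => intro j h; omega
  | succ m ih =>
    intro j hj hlt
    rw [findBad] at hlt
    by_cases hjm : j = m
    · subst hjm
      split at hlt
      · omega
      · assumption
    · have hjm' : j < m := by omega
      split at hlt
      · omega
      · exact ih j hjm' hlt

theorem findBad_bad (K : Int) (arr : List Int) (R : Nat) :
    ∀ n, 0 ≤ findBad K arr R n → ((orSuf arr R (findBad K arr R n).toNat : ℕ) : ℤ) > K := by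
  intro n
  induction n with
  | zero => intro h; simp [findBad] at h
  | succ m ih =>
    intro h
    by_cases hc : ((orSuf arr R m : ℕ) : ℤ) > K
    · have he : findBad K arr R (m+1) = (m : ℤ) := by rw [findBad]; simp [hc]
      rw [he]; simpa using hc
    · have he : findBad K arr R (m+1) = findBad K arr R m := by rw [findBad]; simp [hc]
      rw [he] at h ⊢
      exact ih h

theorem scan_eq_findBad (K : Int) (arr : List Int) (R : Nat) :
    ∀ k, k ≤ R + 1 → pvScan K arr ((orSuf arr R k : ℕ) : ℤ) k = findBad K arr R k := by
  intro k
  induction k with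
  | zero => intro _; rfl
  | succ m ih =>
    intro h
    have hmR : m ≤ R := by omega
    have ho2 : Int.lor ((orSuf arr R (m+1) : ℕ) : ℤ) (Int.land (arr.getD m 0) (Int.shiftLeft 1 30 - 1))
        = ((orSuf arr R m : ℕ) : ℤ) := by
      rw [mask_cast, lorCast, ← orSuf_step arr R m hmR]
    show (if Int.lor ((orSuf arr R (m+1) : ℕ) : ℤ) (Int.land (arr.getD m 0) (Int.shiftLeft 1 30 - 1)) > K
          then (m : ℤ)
          else pvScan K arr (Int.lor ((orSuf arr R (m+1) : ℕ) : ℤ) (Int.land (arr.getD m 0) (Int.shiftLeft 1 30 - 1))) m)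
        = findBad K arr R (m+1)
    rw [ho2, findBad]
    split
    · rfl
    · exact ih (by omega)

-- ---- generic fold/set machinery for the bit_count updates ----
theorem getD_set_self (l : List ℤ) (i : ℕ) (h : i < l.length) (x : ℤ) : (l.set i x).getD i 0 = x := by
  rw [List.getD_eq_getElem?_getD, List.getElem?_set_self h]; rfl

theorem getD_set_ne (l : List ℤ) (i j : ℕ) (h : i ≠ j) (x : ℤ) : (l.set i x).getD j 0 = l.getD j 0 := by
  rw [List.getD_eq_getElem?_getD, List.getElem?_set_ne h, ← List.getD_eq_getElem?_getD]

theorem foldSet_length (P : ℕ → Prop) [DecidablePred P] (u : ℤ → ℤ) :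
    ∀ (n : ℕ) (bc : List ℤ),
    ((List.range n).foldl (fun b i => if P i then b.set i (u (b.getD i 0)) else b) bc).length = bc.length := by
  intro n
  induction n with
  | zero => intro bc; rfl
  | succ m ih =>
    intro bc
    rw [List.range_succ, List.foldl_append, List.foldl_cons, List.foldl_nil]
    split
    · rw [List.length_set]; exact ih bc
    · exact ih bc

theorem foldSet_getD (P : ℕ → Prop) [DecidablePred P] (u : ℤ → ℤ) :
    ∀ (n : ℕ) (bc : List ℤ), n ≤ bc.length → ∀ j,
    ((List.range n).foldl (fun b i => if P i then b.set i (u (b.getD i 0)) else b) bc).getD j 0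
      = if P j ∧ j < n then u (bc.getD j 0) else bc.getD j 0 := by
  intro n
  induction n with
  | zero => intro bc _ j; simp
  | succ m ih =>
    intro bc hm j
    rw [List.range_succ, List.foldl_append, List.foldl_cons, List.foldl_nil]
    have hlen : ((List.range m).foldl (fun b i => if P i then b.set i (u (b.getD i 0)) else b) bc).length = bc.length :=
      foldSet_length P u m bc
    have hIH := ih bc (by omega)
    by_cases hPm : P m
    · rw [if_pos hPm]
      by_cases hjm : j = m
      · subst hjm
        rw [getD_set_self _ _ (by omega) _, hIH j]
        simp [hPm]
      · rw [getD_set_ne _ _ _ (fun he => hjm he.symm) _, hIH j]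
        have hiff : (P j ∧ j < m + 1) ↔ (P j ∧ j < m) := by
          constructor
          · rintro ⟨h1, h2⟩; exact ⟨h1, by omega⟩
          · rintro ⟨h1, h2⟩; exact ⟨h1, by omega⟩
        rw [if_congr hiff rfl rfl]
    · rw [if_neg hPm, hIH j]
      have hiff : (P j ∧ j < m + 1) ↔ (P j ∧ j < m) := by
        constructor
        · rintro ⟨h1, h2⟩
          refine ⟨h1, ?_⟩
          rcases Nat.lt_or_ge j m with h | h
          · exact h
          · have hjm : j = m := by omega
            exact absurd (hjm ▸ h1) hPm
        · rintro ⟨h1, h2⟩; exact ⟨h1, by omega⟩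
      rw [if_congr hiff rfl rfl]

-- ---- A's bit_count list is the per-bit count of the window ----
def cnt (arr : List Int) (L len : Nat) : List Int :=
  (List.range 30).map
    (fun i => (((List.range' L len).filter (fun j => decide (Int.land (arr.getD j 0) (Int.shiftLeft 1 i) ≠ 0))).length : ℤ))

theorem cnt_length (arr : List Int) (L len : Nat) : (cnt arr L len).length = 30 := by
  simp [cnt]

theorem cnt_getD (arr : List Int) (L len : Nat) (j : ℕ) (hj : j < 30) :
    (cnt arr L len).getD j 0
      = (((List.range' L len).filter (fun t => decide (Int.land (arr.getD t 0) (Int.shiftLeft 1 j) ≠ 0))).length : ℤ) := by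
  rw [List.getD_eq_getElem (cnt arr L len) 0 (by rw [cnt_length]; exact hj)]
  simp [cnt]

theorem cnt_zero (arr : List Int) (L : Nat) : cnt arr L 0 = List.replicate 30 0 := by
  have : cnt arr L 0 = (List.range 30).map (fun _ => (0 : ℤ)) := by
    unfold cnt
    simp
  rw [this, List.map_const', List.length_range]

theorem cntAdd (arr : List Int) (L len R : Nat) (h : L + len = R) :
    pvAddBits (arr.getD R 0) (cnt arr L len) = cnt arr L (len + 1) := by
  unfold pvAddBits
  apply List.ext_getElem
  · rw [foldSet_length (fun i => Int.land (arr.getD R 0) (Int.shiftLeft 1 i) ≠ 0) (fun x => x + 1) 30 (cnt arr L len)]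
    rw [cnt_length, cnt_length]
  · intro i h1 h2
    rw [← List.getD_eq_getElem _ 0 h1, ← List.getD_eq_getElem _ 0 h2]
    have hi : i < 30 := by simpa [cnt_length] using h2
    rw [foldSet_getD (fun i => Int.land (arr.getD R 0) (Int.shiftLeft 1 i) ≠ 0) (fun x => x + 1) 30 (cnt arr L len) (by rw [cnt_length]) i]
    rw [cnt_getD arr L len i hi, cnt_getD arr L (len+1) i hi]
    have hconc : List.range' L (len + 1) = List.range' L len ++ [R] := by
      rw [List.range'_concat]
      simp [h]
    rw [hconc, List.filter_append, List.length_append]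
    by_cases hP : Int.land (arr.getD R 0) (Int.shiftLeft 1 i) ≠ 0
    · rw [if_pos ⟨hP, hi⟩]
      have hd : (decide (Int.land (arr.getD R 0) (Int.shiftLeft 1 i) ≠ 0)) = true := decide_eq_true hP
      simp only [List.filter_cons, List.filter_nil, hd, if_true]
      push_cast
      simp
    · rw [if_neg (by intro hc; exact hP hc.1)]
      have hd : (decide (Int.land (arr.getD R 0) (Int.shiftLeft 1 i) ≠ 0)) = false := decide_eq_false hP
      simp only [List.filter_cons, List.filter_nil, hd]
      push_cast
      simp

theorem cntDec (arr : List Int) (L len : Nat) :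
    pvDelBits (arr.getD L 0) (cnt arr L (len + 1)) = cnt arr (L + 1) len := by
  unfold pvDelBits
  apply List.ext_getElem
  · rw [foldSet_length (fun i => Int.land (arr.getD L 0) (Int.shiftLeft 1 i) ≠ 0) (fun x => x - 1) 30 (cnt arr L (len+1))]
    rw [cnt_length, cnt_length]
  · intro i h1 h2
    rw [← List.getD_eq_getElem _ 0 h1, ← List.getD_eq_getElem _ 0 h2]
    have hi : i < 30 := by simpa [cnt_length] using h2
    rw [foldSet_getD (fun i => Int.land (arr.getD L 0) (Int.shiftLeft 1 i) ≠ 0) (fun x => x - 1) 30 (cnt arr L (len+1)) (by rw [cnt_length]) i]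
    rw [cnt_getD arr L (len+1) i hi, cnt_getD arr (L+1) len i hi]
    have hcons : List.range' L (len + 1) = L :: List.range' (L + 1) len := List.range'_succ
    rw [hcons]
    by_cases hP : Int.land (arr.getD L 0) (Int.shiftLeft 1 i) ≠ 0
    · rw [if_pos ⟨hP, hi⟩]
      have hd : (decide (Int.land (arr.getD L 0) (Int.shiftLeft 1 i) ≠ 0)) = true := decide_eq_true hP
      simp only [List.filter_cons, hd, if_true]
      simp
    · rw [if_neg (by intro hc; exact hP hc.1)]
      have hd : (decide (Int.land (arr.getD L 0) (Int.shiftLeft 1 i) ≠ 0)) = false := decide_eq_false hP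
      simp only [List.filter_cons, hd]
      push_cast
      simp

def natOrFold (P : ℕ → Prop) [DecidablePred P] (n : ℕ) : ℕ :=
  (List.range n).foldl (fun r i => if P i then r ||| 2 ^ i else r) 0

theorem orFold_cast (P : ℕ → Prop) [DecidablePred P] :
    ∀ n, (List.range n).foldl (fun r i => if P i then Int.lor r (Int.shiftLeft 1 i) else r) 0
      = ((natOrFold P n : ℕ) : ℤ) := by
  intro n
  induction n with
  | zero => rfl
  | succ m ih =>
    rw [List.range_succ, List.foldl_append, List.foldl_cons, List.foldl_nil, ih]
    unfold natOrFold
    rw [List.range_succ, List.foldl_append, List.foldl_cons, List.foldl_nil]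
    by_cases hP : P m
    · rw [if_pos hP, if_pos hP, shiftCast, lorCast]
    · rw [if_neg hP, if_neg hP]

theorem natOrFold_testBit (P : ℕ → Prop) [DecidablePred P] :
    ∀ n j, (natOrFold P n).testBit j = (decide (P j) && decide (j < n)) := by
  intro n
  induction n with
  | zero => intro j; simp [natOrFold, Nat.zero_testBit]
  | succ m ih =>
    intro j
    have hstep : natOrFold P (m+1) = if P m then natOrFold P m ||| 2 ^ m else natOrFold P m := by
      unfold natOrFold
      rw [List.range_succ, List.foldl_append, List.foldl_cons, List.foldl_nil]
    rw [hstep]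
    by_cases hjm : j = m
    · subst hjm
      by_cases hP : P j
      · rw [if_pos hP, Nat.testBit_or, Nat.testBit_two_pow]
        simp [hP]
      · rw [if_neg hP, ih j]
        simp [hP]
    · by_cases hP : P m
      · rw [if_pos hP, Nat.testBit_or, Nat.testBit_two_pow, ih j]
        have h1 : (decide (m = j)) = false := by
          apply decide_eq_false
          intro he
          exact hjm he.symm
        have h2 : (decide (j < m)) = decide (j < m + 1) := by
          by_cases hlt : j < m
          · simp [hlt, Nat.lt_succ_of_lt hlt]
          · have : ¬ j < m + 1 := by omega
            simp [hlt, this]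
        rw [h1, h2]
        simp
      · rw [if_neg hP, ih j]
        have h2 : (decide (j < m)) = decide (j < m + 1) := by
          by_cases hlt : j < m
          · simp [hlt, Nat.lt_succ_of_lt hlt]
          · have : ¬ j < m + 1 := by omega
            simp [hlt, this]
        rw [h2]

theorem cntOr (arr : List Int) (L R : Nat) :
    pvComputeOr (cnt arr L (R + 1 - L)) = ((orSuf arr R L : ℕ) : ℤ) := by
  unfold pvComputeOr
  rw [orFold_cast (fun i => (cnt arr L (R + 1 - L)).getD i 0 > 0) 30]
  congr 1
  apply Nat.eq_of_testBit_eq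
  intro j
  rw [natOrFold_testBit, orSuf_testBit arr R j (R + 1 - L) L rfl]
  by_cases hj : j < 30
  · have hcond : (decide ((cnt arr L (R + 1 - L)).getD j 0 > 0))
        = (List.range' L (R + 1 - L)).any (fun t => (mN (arr.getD t 0)).testBit j) := by
      rw [cnt_getD arr L (R + 1 - L) j hj]
      have hpt : ∀ t : ℕ, (mN (arr.getD t 0)).testBit j
          = decide (Int.land (arr.getD t 0) (Int.shiftLeft 1 j) ≠ 0) := by
        intro t
        rw [mN_testBit]
        simp only [hj, decide_true, Bool.true_and]
        by_cases hb : (arr.getD t 0).testBit j = true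
        · rw [hb, decide_eq_true ((land_pow_ne (arr.getD t 0) j).mpr hb)]
        · have hb' : (arr.getD t 0).testBit j = false := by
            cases hx : (arr.getD t 0).testBit j
            · rfl
            · exact absurd hx hb
          rw [hb', decide_eq_false (fun hne => hb ((land_pow_ne (arr.getD t 0) j).mp hne))]
      have hfun : (fun t : ℕ => (mN (arr.getD t 0)).testBit j)
          = (fun t : ℕ => decide (Int.land (arr.getD t 0) (Int.shiftLeft 1 j) ≠ 0)) := funext hpt
      rw [hfun]
      cases hb : (List.range' L (R + 1 - L)).any (fun t => decide (Int.land (arr.getD t 0) (Int.shiftLeft 1 j) ≠ 0)) with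
      | false =>
        apply decide_eq_false
        intro hpos
        have hne : ((List.range' L (R + 1 - L)).filter (fun t => decide (Int.land (arr.getD t 0) (Int.shiftLeft 1 j) ≠ 0))) ≠ [] := by
          apply List.length_pos_iff.mp
          exact_mod_cast hpos
        obtain ⟨x, hx⟩ := List.exists_mem_of_ne_nil _ hne
        obtain ⟨h1, h2⟩ := List.mem_filter.mp hx
        have hc : (List.range' L (R + 1 - L)).any (fun t => decide (Int.land (arr.getD t 0) (Int.shiftLeft 1 j) ≠ 0)) = true :=
          List.any_eq_true.mpr ⟨x, h1, h2⟩
        rw [hb] at hc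
        exact Bool.false_ne_true hc
      | true =>
        apply decide_eq_true
        obtain ⟨x, h1, h2⟩ := List.any_eq_true.mp hb
        have hmem : x ∈ (List.range' L (R + 1 - L)).filter (fun t => decide (Int.land (arr.getD t 0) (Int.shiftLeft 1 j) ≠ 0)) :=
          List.mem_filter.mpr ⟨h1, h2⟩
        have hpos : 0 < ((List.range' L (R + 1 - L)).filter (fun t => decide (Int.land (arr.getD t 0) (Int.shiftLeft 1 j) ≠ 0))).length := by
          apply List.length_pos_iff.mpr
          intro he
          rw [he] at hmem
          simp at hmem
        exact_mod_cast hpos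
    rw [← hcond]
    simp [hj]
  · have h30 : (decide (j < 30)) = false := by simp [hj]
    have hall : (List.range' L (R + 1 - L)).any (fun t => (mN (arr.getD t 0)).testBit j) = false := by
      apply List.any_eq_false.mpr
      intro t _
      rw [mN_testBit]
      simp [hj]
    rw [hall]
    simp [hj]

-- ---- the shrink loop lands exactly on findBad + 1 ----
theorem shrink_spec (K : Int) (arr : List Int) (R : Nat) :
    ∀ fuel L, L ≤ (findBad K arr R (R+1) + 1).toNat → (findBad K arr R (R+1) + 1).toNat ≤ L + fuel →
    pvShrink K arr R fuel (cnt arr L (R + 1 - L), L)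
      = (cnt arr (findBad K arr R (R+1) + 1).toNat (R + 1 - (findBad K arr R (R+1) + 1).toNat),
         (findBad K arr R (R+1) + 1).toNat) := by
  have hf1 := findBad_ge K arr R (R+1)
  have hf2 := findBad_lt K arr R (R+1)
  intro fuel
  induction fuel with
  | zero =>
    intro L hL hs
    have hLs : L = (findBad K arr R (R+1) + 1).toNat := by omega
    subst hLs
    rfl
  | succ fuel ih =>
    intro L hL hs
    rw [pvShrink]
    by_cases hLs : L = (findBad K arr R (R+1) + 1).toNat
    · have hcond : ¬ (L ≤ R ∧ pvComputeOr (cnt arr L (R + 1 - L)) > K) := by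
        rintro ⟨h1, h2⟩
        rw [cntOr arr L R] at h2
        exact findBad_good K arr R (R+1) L (by omega) (by omega) h2
      rw [if_neg hcond, hLs]
    · have hLlt : L < (findBad K arr R (R+1) + 1).toNat := by omega
      have hcond : (L ≤ R ∧ pvComputeOr (cnt arr L (R + 1 - L)) > K) := by
        refine ⟨by omega, ?_⟩
        rw [cntOr arr L R]
        have hf0 : 0 ≤ findBad K arr R (R+1) := by omega
        have hbad := findBad_bad K arr R (R+1) hf0
        have hle : orSuf arr R (findBad K arr R (R+1)).toNat ≤ orSuf arr R L :=
          orSuf_anti arr R L (findBad K arr R (R+1)).toNat (by omega)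
        have hcast := Int.ofNat_le.mpr hle
        omega
      rw [if_pos hcond]
      have hrw : R + 1 - L = (R - L) + 1 := by omega
      rw [hrw, cntDec arr L (R - L)]
      have hrw2 : R - L = R + 1 - (L + 1) := by omega
      rw [hrw2]
      exact ih (L+1) (by omega) (by omega)

-- ---- outer induction ----
def tS (K : Int) (arr : List Int) : Nat → Nat
  | 0 => 0
  | N+1 => (findBad K arr N (N+1) + 1).toNat

theorem tS_le (K : Int) (arr : List Int) : ∀ N, tS K arr N ≤ N := by
  intro N
  cases N with
  | zero => simp [tS]
  | succ M =>
    show (findBad K arr M (M+1) + 1).toNat ≤ M + 1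
    have := findBad_lt K arr M (M+1)
    omega

theorem tS_mono (K : Int) (arr : List Int) : ∀ N, tS K arr N ≤ tS K arr (N+1) := by
  intro N
  cases N with
  | zero => exact Nat.zero_le _
  | succ M =>
    show (findBad K arr M (M+1) + 1).toNat ≤ (findBad K arr (M+1) (M+2) + 1).toNat
    have h1 := findBad_ge K arr M (M+1)
    have h2 := findBad_ge K arr (M+1) (M+2)
    by_cases hf : 0 ≤ findBad K arr M (M+1)
    · have hbad := findBad_bad K arr M (M+1) hf
      have hjM : (findBad K arr M (M+1)).toNat ≤ M := by
        have := findBad_lt K arr M (M+1)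
        omega
      have hsucc := orSuf_succR arr M (M + 2 - (findBad K arr M (M+1)).toNat) (findBad K arr M (M+1)).toNat rfl (by omega)
      have hmono : orSuf arr M (findBad K arr M (M+1)).toNat ≤ orSuf arr (M+1) (findBad K arr M (M+1)).toNat := by
        rw [hsucc]
        exact nat_le_lor_left _ _
      have hbad2 : ((orSuf arr (M+1) (findBad K arr M (M+1)).toNat : ℕ) : ℤ) > K := by
        have := Int.ofNat_le.mpr hmono
        omega
      by_contra hcon
      have hlt : findBad K arr (M+1) (M+2) < ((findBad K arr M (M+1)).toNat : ℤ) := by omega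
      exact (findBad_good K arr (M+1) (M+2) (findBad K arr M (M+1)).toNat (by omega) hlt) hbad2
    · omega

theorem mainA (K : Int) (arr : List Int) : ∀ N,
    (List.range N).foldl (pvStepA K arr) (0, List.replicate 30 0, 0)
      = ((List.range N).foldl (fun (b : ℤ) (R : ℕ) => max b ((R : ℤ) - findBad K arr R (R+1))) 0,
         cnt arr (tS K arr N) (N - tS K arr N), tS K arr N) := by
  intro N
  induction N with
  | zero =>
    show (0, List.replicate 30 (0 : ℤ), (0 : ℕ)) = (0, cnt arr (tS K arr 0) (0 - tS K arr 0), tS K arr 0)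
    rw [show tS K arr 0 = 0 from rfl, cnt_zero]
  | succ N ih =>
    rw [List.range_succ, List.foldl_append, List.foldl_cons, List.foldl_nil, ih,
      List.foldl_append, List.foldl_cons, List.foldl_nil]
    have htle := tS_le K arr N
    have htle' := tS_le K arr (N+1)
    have htm := tS_mono K arr N
    have hfge := findBad_ge K arr N (N+1)
    have hstS : tS K arr (N+1) = (findBad K arr N (N+1) + 1).toNat := rfl
    have hadd : pvAddBits (arr.getD N 0) (cnt arr (tS K arr N) (N - tS K arr N))
        = cnt arr (tS K arr N) ((N - tS K arr N) + 1) := cntAdd arr _ _ N (by omega)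
    have hlen : (N - tS K arr N) + 1 = N + 1 - tS K arr N := by omega
    have hshr : pvShrink K arr N (N + 1) (cnt arr (tS K arr N) (N + 1 - tS K arr N), tS K arr N)
        = (cnt arr (tS K arr (N+1)) (N + 1 - tS K arr (N+1)), tS K arr (N+1)) := by
      rw [hstS]
      exact shrink_spec K arr N (N+1) (tS K arr N) (by rw [← hstS]; exact htm) (by rw [← hstS]; omega)
    show (max ((List.range N).foldl (fun (b : ℤ) (R : ℕ) => max b ((R : ℤ) - findBad K arr R (R+1))) 0)
            ((N : ℤ) - ((pvShrink K arr N (N + 1) (pvAddBits (arr.getD N 0) (cnt arr (tS K arr N) (N - tS K arr N)), tS K arr N)).2 : ℤ) + 1),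
          (pvShrink K arr N (N + 1) (pvAddBits (arr.getD N 0) (cnt arr (tS K arr N) (N - tS K arr N)), tS K arr N)).1,
          (pvShrink K arr N (N + 1) (pvAddBits (arr.getD N 0) (cnt arr (tS K arr N) (N - tS K arr N)), tS K arr N)).2)
        = _
    rw [hadd, hlen, hshr]
    have hterm : (N : ℤ) - (tS K arr (N+1) : ℤ) + 1 = (N : ℤ) - findBad K arr N (N+1) := by
      have : ((tS K arr (N+1) : ℕ) : ℤ) = findBad K arr N (N+1) + 1 := by
        rw [hstS]
        exact Int.toNat_of_nonneg (by omega)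
      omega
    rw [hterm]

-- ===== VERDICT (by name: the statement is the Claim_ definition above) =====
theorem bit_016_solution_spec : Claim_equal_bit_016_solution := by
  intro n K arr _
  unfold Spec_bit_016_solution bit_016_solution bit_016_solution_alt
  by_cases hg : arr = [] ∨ n = 0
  · simp [hg]
  · simp only [hg, if_false]
    have hB : ∀ R : Nat, pvScan K arr 0 (R + 1) = findBad K arr R (R + 1) := by
      intro R
      have h0 : ((orSuf arr R (R+1) : ℕ) : ℤ) = 0 := by
        rw [orSuf_stop arr R (R+1) (by omega)]; rfl
      have := scan_eq_findBad K arr R (R+1) (le_refl _)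
      rwa [h0] at this
    have : (fun (best : ℤ) (R : Nat) => max best ((R : ℤ) - pvScan K arr 0 (R + 1)))
        = (fun (best : ℤ) (R : Nat) => max best ((R : ℤ) - findBad K arr R (R+1))) := by
      funext b R; rw [hB R]
    rw [mainA K arr arr.length, this]
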